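-- pv_equiv track=rewrite | github.com/hyang0129/pyscope-mcp | src/pyscope_mcp/graph.py | _raw_to_nodes
-- ===== SOURCE A (Python) =====
-- def _raw_to_nodes(raw: dict[str, list[str]]) -> dict[str, dict]:
--     """Convert legacy ``raw`` (caller → [callees]) to site-keyed ``nodes`` shape.
--
--     Build-time inversion: every ``(caller, callee)`` pair in *raw* yields
--     ``nodes[caller]["calls"]["call"]`` (forward) and
--     ``nodes[callee]["called_by"]["call"]`` (reverse).  Both endpoints get a
--     ``NodeRecord`` skeleton with sorted, deduplicated lists per kind so the
--     serialisation determinism invariant (Corollary 3.2) holds regardless of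
--     insertion order.
--     """
--     forward: dict[str, set[str]] = {}
--     reverse: dict[str, set[str]] = {}
--     for caller, callees in raw.items():
--         forward.setdefault(caller, set()).update(callees)
--         for callee in callees:
--             reverse.setdefault(callee, set()).add(caller)
--             forward.setdefault(callee, set())  # ensure callee node exists
--         # Keep callers with empty callee list as nodes too.
--         forward.setdefault(caller, set())
--
--     all_symbols = set(forward) | set(reverse)
--     nodes: dict[str, dict] = {}
--     for sym in sorted(all_symbols):
--         record: dict[str, dict[str, list[str]]] = {"calls": {}, "called_by": {}}
--         callees = forward.get(sym, set())
--         if callees: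
--             record["calls"]["call"] = sorted(callees)
--         callers = reverse.get(sym, set())
--         if callers:
--             record["called_by"]["call"] = sorted(callers)
--         nodes[sym] = record
--     return nodes
-- ===== SOURCE B (Python) =====
-- def _raw_to_nodes(raw: dict[str, list[str]]) -> dict[str, dict]:
--     """Site-keyed nodes rebuilt per symbol straight from raw, without
--     accumulating forward/reverse set-dicts."""
--     symbols = set(raw)
--     for cs in raw.values():
--         symbols.update(cs)
--     nodes: dict[str, dict] = {}
--     for sym in sorted(symbols):
--         callees = sorted(set(raw.get(sym, [])))
--         callers = sorted({caller for caller, cs in raw.items() if sym in cs})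
--         nodes[sym] = {
--             "calls": {"call": callees} if callees else {},
--             "called_by": {"call": callers} if callers else {},
--         }
--     return nodes
-- ===== Notes on version B (the rewrite author's own statement) =====
-- stated objective: simpler
-- what changed: B drops A's two accumulated forward/reverse set-dicts entirely and, for each symbol of the flat symbol set, rebuilds the sorted callee list by a direct raw lookup and the caller list by a set comprehension over raw's items.
import Mathlib
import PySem

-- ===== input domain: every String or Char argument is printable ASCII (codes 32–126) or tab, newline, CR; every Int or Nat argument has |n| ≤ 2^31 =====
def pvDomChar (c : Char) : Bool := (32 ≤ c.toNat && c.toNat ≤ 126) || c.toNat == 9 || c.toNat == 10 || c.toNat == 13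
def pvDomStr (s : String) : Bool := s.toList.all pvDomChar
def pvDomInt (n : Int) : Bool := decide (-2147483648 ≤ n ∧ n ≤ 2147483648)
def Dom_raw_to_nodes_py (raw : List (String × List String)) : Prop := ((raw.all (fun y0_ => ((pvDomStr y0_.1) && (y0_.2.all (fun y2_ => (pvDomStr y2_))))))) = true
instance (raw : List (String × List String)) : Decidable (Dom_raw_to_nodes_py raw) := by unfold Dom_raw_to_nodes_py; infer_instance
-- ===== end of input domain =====

-- B replaces A's accumulated forward/reverse set-dicts by per-symbol direct lookups/comprehensions over raw (objective: simpler).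

-- ===== PORT A =====
-- inner 'for callee in callees' body: forward.setdefault(callee, set()); reverse.setdefault(callee, set()).add(caller)
def pvAInner (caller : String)
    (fr : PySem.Dict String (PySem.Set String) × PySem.Dict String (PySem.Set String))
    (callee : String) :
    PySem.Dict String (PySem.Set String) × PySem.Dict String (PySem.Set String) :=
  (PySem.Dict.setdefault fr.1 callee PySem.Set.empty,
   PySem.Dict.modify fr.2 callee PySem.Set.empty (fun s => PySem.Set.add s caller))

-- one iteration of 'for caller, callees in raw.items()'
def pvAStep (fr : PySem.Dict String (PySem.Set String) × PySem.Dict String (PySem.Set String))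
    (cr : String × List String) :
    PySem.Dict String (PySem.Set String) × PySem.Dict String (PySem.Set String) :=
  let f1 := PySem.Dict.modify fr.1 cr.1 PySem.Set.empty (fun s => PySem.Set.update s cr.2)
  let fr2 := cr.2.foldl (pvAInner cr.1) (f1, fr.2)
  (PySem.Dict.setdefault fr2.1 cr.1 PySem.Set.empty, fr2.2)

def pvAMaps (raw : List (String × List String)) :
    PySem.Dict String (PySem.Set String) × PySem.Dict String (PySem.Set String) :=
  raw.foldl pvAStep (PySem.Dict.empty, PySem.Dict.empty)

-- the body of 'for sym in sorted(all_symbols)'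
def pvARecord (forward reverse : PySem.Dict String (PySem.Set String)) (sym : String) :
    PySem.Dict String (PySem.Dict String (List String)) :=
  let record : PySem.Dict String (PySem.Dict String (List String)) :=
    PySem.Dict.mk [("calls", PySem.Dict.empty), ("called_by", PySem.Dict.empty)]
  let callees := PySem.Dict.getD forward sym PySem.Set.empty
  let record := if callees.isEmpty then record else
    PySem.Dict.modify record "calls" PySem.Dict.empty
      (fun d => PySem.Dict.insert d "call" (PySem.List.sorted callees (fun x => x) false))
  let callers := PySem.Dict.getD reverse sym PySem.Set.empty
  if callers.isEmpty then record else
    PySem.Dict.modify record "called_by" PySem.Dict.empty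
      (fun d => PySem.Dict.insert d "call" (PySem.List.sorted callers (fun x => x) false))

def pvASymbols (raw : List (String × List String)) : PySem.Set String :=
  PySem.Set.union (PySem.Set.ofList (PySem.Dict.keys (pvAMaps raw).1))
    (PySem.Set.ofList (PySem.Dict.keys (pvAMaps raw).2))

-- shared output encoding: the returned nested dicts rendered as association lists
def pvOut (nodes : PySem.Dict String (PySem.Dict String (PySem.Dict String (List String)))) :
    List (String × List (String × List (String × List String))) :=
  (PySem.Dict.items nodes).map (fun p => (p.1, (PySem.Dict.items p.2).map (fun q => (q.1, PySem.Dict.items q.2))))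

def raw_to_nodes_py (raw : List (String × List String)) :
    List (String × List (String × List (String × List String))) :=
  pvOut ((PySem.List.sorted (pvASymbols raw) (fun x => x) false).foldl
    (fun nodes sym => PySem.Dict.insert nodes sym (pvARecord (pvAMaps raw).1 (pvAMaps raw).2 sym))
    PySem.Dict.empty)

-- ===== PORT B =====
-- symbols = set(raw); for cs in raw.values(): symbols.update(cs)
def pvBSymbols (raw : List (String × List String)) : PySem.Set String :=
  raw.foldl (fun s cr => PySem.Set.update s cr.2)
    (PySem.Set.ofList (PySem.Dict.keys (PySem.Dict.mk raw)))

-- nodes[sym] = {"calls": {"call": callees} if callees else {}, "called_by": {"call": callers} if callers else {}}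
def pvBRecord (raw : List (String × List String)) (sym : String) :
    PySem.Dict String (PySem.Dict String (List String)) :=
  let callees := PySem.List.sorted
    (PySem.Set.ofList (PySem.Dict.getD (PySem.Dict.mk raw) sym [])) (fun x => x) false
  let callers := PySem.List.sorted
    (PySem.Set.ofList ((raw.filter (fun e => e.2.contains sym)).map Prod.fst)) (fun x => x) false
  PySem.Dict.mk
    [("calls", if callees.isEmpty then PySem.Dict.empty else PySem.Dict.mk [("call", callees)]),
     ("called_by", if callers.isEmpty then PySem.Dict.empty else PySem.Dict.mk [("call", callers)])]

def raw_to_nodes_py_alt (raw : List (String × List String)) :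
    List (String × List (String × List (String × List String))) :=
  pvOut ((PySem.List.sorted (pvBSymbols raw) (fun x => x) false).foldl
    (fun nodes sym => PySem.Dict.insert nodes sym (pvBRecord raw sym))
    PySem.Dict.empty)

-- ===== PRECONDITION & SPEC =====
-- Pre_ excludes association lists with duplicate caller keys: those do not encode a Python dict
-- (dict construction collapses them, last value winning), and A's item iteration unions all
-- duplicate entries while B's first-match lookup reads only the first.
def Pre_raw_to_nodes_py (raw : List (String × List String)) : Prop :=
  (raw.map Prod.fst).Nodup
instance (raw : List (String × List String)) : Decidable (Pre_raw_to_nodes_py raw) := by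
  unfold Pre_raw_to_nodes_py; infer_instance

def pvWitness_raw_to_nodes_py : (List (String × List String)) := [("a", ["b", "a"]), ("c", [])]

def Spec_raw_to_nodes_py (raw : List (String × List String))
    (out : List (String × List (String × List (String × List String)))) : Prop :=
  out = raw_to_nodes_py_alt raw
instance (raw : List (String × List String))
    (out : List (String × List (String × List (String × List String)))) :
    Decidable (Spec_raw_to_nodes_py raw out) := by unfold Spec_raw_to_nodes_py; infer_instance

-- ===== CLAIM (what is proved, stated in full; the proofs are below) =====
def Claim_equal_raw_to_nodes_py : Prop := ∀ (raw : List (String × List String)),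
  Dom_raw_to_nodes_py raw → Pre_raw_to_nodes_py raw →
  Spec_raw_to_nodes_py raw (raw_to_nodes_py raw)

-- ===== LEMMAS AND PROOFS =====

-- setdefault with the default value never changes a getD-with-that-default read
theorem pv_getD_setdefault {κ ν : Type} [BEq κ] [LawfulBEq κ]
    (d : PySem.Dict κ ν) (k k' : κ) (v : ν) :
    (d.setdefault k v).getD k' v = d.getD k' v := by
  by_cases h : k' = k
  · subst h; exact PySem.Dict.getD_setdefault_self d k' v v
  · unfold PySem.Dict.getD
    rw [PySem.Dict.get?_setdefault_of_ne d v h]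

theorem pv_mem_keys_setdefault {κ ν : Type} [BEq κ] [LawfulBEq κ]
    (d : PySem.Dict κ ν) (k k' : κ) (v : ν) :
    k' ∈ (d.setdefault k v).keys ↔ k' ∈ d.keys ∨ k' = k := by
  rw [PySem.Dict.keys_setdefault]
  by_cases h : d.contains k = true
  · simp only [if_pos h]
    have hk : k ∈ d.keys := (PySem.Dict.contains_iff_mem_keys d k).1 h
    constructor
    · exact Or.inl
    · rintro (hm | rfl); exact hm; exact hk
  · simp only [if_neg h, List.mem_append, List.mem_singleton]

theorem pv_mem_keys_modify {κ ν : Type} [BEq κ] [LawfulBEq κ]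
    (d : PySem.Dict κ ν) (k k' : κ) (d0 : ν) (f : ν → ν) :
    k' ∈ (d.modify k d0 f).keys ↔ k' ∈ d.keys ∨ k' = k := by
  rw [PySem.Dict.keys_modify, PySem.Dict.mem_keys_insert]; tauto

theorem pv_set_add_idem {α : Type} [BEq α] [LawfulBEq α] (s : PySem.Set α) (x : α) :
    PySem.Set.add (PySem.Set.add s x) x = PySem.Set.add s x := by
  have hx : x ∈ PySem.Set.add s x := (PySem.Set.mem_add s x x).2 (Or.inr rfl)
  unfold PySem.Set.add
  split_ifs with h1 h2 <;> simp_all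

-- the inner 'for callee in callees' loop: forward getD values untouched, reverse gets caller added at every sym ∈ cs
theorem pv_inner_fwd (caller : String) (cs : List String) :
    ∀ (fr : PySem.Dict String (PySem.Set String) × PySem.Dict String (PySem.Set String)) (sym : String),
    PySem.Dict.getD (cs.foldl (pvAInner caller) fr).1 sym PySem.Set.empty
      = PySem.Dict.getD fr.1 sym PySem.Set.empty := by
  induction cs with
  | nil => intro fr sym; rfl
  | cons c cs ih =>
    intro fr sym
    rw [List.foldl_cons, ih]
    exact pv_getD_setdefault fr.1 c sym PySem.Set.empty

theorem pv_inner_rev (caller : String) (cs : List String) :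
    ∀ (fr : PySem.Dict String (PySem.Set String) × PySem.Dict String (PySem.Set String)) (sym : String),
    PySem.Dict.getD (cs.foldl (pvAInner caller) fr).2 sym PySem.Set.empty
      = if sym ∈ cs then PySem.Set.add (PySem.Dict.getD fr.2 sym PySem.Set.empty) caller
        else PySem.Dict.getD fr.2 sym PySem.Set.empty := by
  induction cs with
  | nil => intro fr sym; simp
  | cons c cs ih =>
    intro fr sym
    rw [List.foldl_cons, ih]
    have hstep : PySem.Dict.getD (pvAInner caller fr c).2 sym PySem.Set.empty
        = if sym = c then PySem.Set.add (PySem.Dict.getD fr.2 sym PySem.Set.empty) caller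
          else PySem.Dict.getD fr.2 sym PySem.Set.empty := by
      by_cases h : sym = c
      · subst h
        simp only [pvAInner]
        exact PySem.Dict.getD_modify_self fr.2 sym PySem.Set.empty
          (fun s => PySem.Set.add s caller)
      · simp only [if_neg h, pvAInner]
        exact PySem.Dict.getD_modify_of_ne fr.2 PySem.Set.empty _ h
    rw [hstep]
    rcases eq_or_ne sym c with rfl | h2
    · by_cases h1 : sym ∈ cs <;> simp [h1, pv_set_add_idem]
    · by_cases h1 : sym ∈ cs <;> simp [h1, h2, List.mem_cons]

theorem pv_inner_keys1 (caller : String) (cs : List String) :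
    ∀ (fr : PySem.Dict String (PySem.Set String) × PySem.Dict String (PySem.Set String)) (x : String),
    x ∈ (cs.foldl (pvAInner caller) fr).1.keys ↔ x ∈ fr.1.keys ∨ x ∈ cs := by
  induction cs with
  | nil => intro fr x; simp
  | cons c cs ih =>
    intro fr x
    rw [List.foldl_cons, ih]
    have : x ∈ (pvAInner caller fr c).1.keys ↔ x ∈ fr.1.keys ∨ x = c :=
      pv_mem_keys_setdefault fr.1 c x PySem.Set.empty
    simp [this, List.mem_cons]; tauto

theorem pv_inner_keys2 (caller : String) (cs : List String) :
    ∀ (fr : PySem.Dict String (PySem.Set String) × PySem.Dict String (PySem.Set String)) (x : String),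
    x ∈ (cs.foldl (pvAInner caller) fr).2.keys ↔ x ∈ fr.2.keys ∨ x ∈ cs := by
  induction cs with
  | nil => intro fr x; simp
  | cons c cs ih =>
    intro fr x
    rw [List.foldl_cons, ih]
    have : x ∈ (pvAInner caller fr c).2.keys ↔ x ∈ fr.2.keys ∨ x = c :=
      pv_mem_keys_modify fr.2 c x PySem.Set.empty (fun s => PySem.Set.add s caller)
    simp [this, List.mem_cons]; tauto

-- one outer iteration, value level
theorem pv_step_fwd (fr : PySem.Dict String (PySem.Set String) × PySem.Dict String (PySem.Set String))
    (cr : String × List String) (sym : String) :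
    PySem.Dict.getD (pvAStep fr cr).1 sym PySem.Set.empty
      = if cr.1 = sym then PySem.Set.update (PySem.Dict.getD fr.1 sym PySem.Set.empty) cr.2
        else PySem.Dict.getD fr.1 sym PySem.Set.empty := by
  unfold pvAStep
  rw [pv_getD_setdefault, pv_inner_fwd]
  by_cases h : cr.1 = sym
  · subst h
    simpa using PySem.Dict.getD_modify_self fr.1 cr.1 PySem.Set.empty
      (fun s => PySem.Set.update s cr.2)
  · have h' : sym ≠ cr.1 := fun hh => h hh.symm
    rw [if_neg h]
    exact PySem.Dict.getD_modify_of_ne fr.1 PySem.Set.empty _ h'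

theorem pv_step_rev (fr : PySem.Dict String (PySem.Set String) × PySem.Dict String (PySem.Set String))
    (cr : String × List String) (sym : String) :
    PySem.Dict.getD (pvAStep fr cr).2 sym PySem.Set.empty
      = if sym ∈ cr.2 then PySem.Set.add (PySem.Dict.getD fr.2 sym PySem.Set.empty) cr.1
        else PySem.Dict.getD fr.2 sym PySem.Set.empty := by
  unfold pvAStep
  rw [pv_inner_rev]

theorem pv_step_keys1 (fr : PySem.Dict String (PySem.Set String) × PySem.Dict String (PySem.Set String))
    (cr : String × List String) (x : String) :
    x ∈ (pvAStep fr cr).1.keys ↔ x ∈ fr.1.keys ∨ x = cr.1 ∨ x ∈ cr.2 := by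
  unfold pvAStep
  rw [pv_mem_keys_setdefault, pv_inner_keys1,
    pv_mem_keys_modify fr.1 cr.1 x PySem.Set.empty (fun s => PySem.Set.update s cr.2)]
  tauto

theorem pv_step_keys2 (fr : PySem.Dict String (PySem.Set String) × PySem.Dict String (PySem.Set String))
    (cr : String × List String) (x : String) :
    x ∈ (pvAStep fr cr).2.keys ↔ x ∈ fr.2.keys ∨ x ∈ cr.2 := by
  unfold pvAStep
  rw [pv_inner_keys2]

-- the whole outer fold, membership level
theorem pv_fold_fwd_mem (raw : List (String × List String)) :
    ∀ (fr : PySem.Dict String (PySem.Set String) × PySem.Dict String (PySem.Set String)) (sym x : String),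
    x ∈ PySem.Dict.getD (raw.foldl pvAStep fr).1 sym PySem.Set.empty ↔
      x ∈ PySem.Dict.getD fr.1 sym PySem.Set.empty ∨ ∃ e ∈ raw, e.1 = sym ∧ x ∈ e.2 := by
  induction raw with
  | nil => intro fr sym x; simp
  | cons e t ih =>
    intro fr sym x
    rw [List.foldl_cons, ih]
    rw [pv_step_fwd fr e sym]
    by_cases h : e.1 = sym <;>
      simp [h, PySem.Set.mem_update, List.mem_cons] <;> tauto

theorem pv_fold_rev_mem (raw : List (String × List String)) :
    ∀ (fr : PySem.Dict String (PySem.Set String) × PySem.Dict String (PySem.Set String)) (sym x : String),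
    x ∈ PySem.Dict.getD (raw.foldl pvAStep fr).2 sym PySem.Set.empty ↔
      x ∈ PySem.Dict.getD fr.2 sym PySem.Set.empty ∨ ∃ e ∈ raw, e.1 = x ∧ sym ∈ e.2 := by
  induction raw with
  | nil => intro fr sym x; simp
  | cons e t ih =>
    intro fr sym x
    rw [List.foldl_cons, ih]
    rw [pv_step_rev fr e sym]
    by_cases h : sym ∈ e.2 <;>
      simp [h, PySem.Set.mem_add, List.mem_cons] <;> tauto

theorem pv_fold_fwd_nodup (raw : List (String × List String)) :
    ∀ (fr : PySem.Dict String (PySem.Set String) × PySem.Dict String (PySem.Set String)) (sym : String),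
    (PySem.Dict.getD fr.1 sym PySem.Set.empty).Nodup →
    (PySem.Dict.getD (raw.foldl pvAStep fr).1 sym PySem.Set.empty).Nodup := by
  induction raw with
  | nil => intro fr sym h; exact h
  | cons e t ih =>
    intro fr sym h
    rw [List.foldl_cons]
    apply ih
    rw [pv_step_fwd]
    split_ifs with hc
    · exact PySem.Set.nodup_update _ _ h
    · exact h

theorem pv_fold_rev_nodup (raw : List (String × List String)) :
    ∀ (fr : PySem.Dict String (PySem.Set String) × PySem.Dict String (PySem.Set String)) (sym : String),
    (PySem.Dict.getD fr.2 sym PySem.Set.empty).Nodup →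
    (PySem.Dict.getD (raw.foldl pvAStep fr).2 sym PySem.Set.empty).Nodup := by
  induction raw with
  | nil => intro fr sym h; exact h
  | cons e t ih =>
    intro fr sym h
    rw [List.foldl_cons]
    apply ih
    rw [pv_step_rev]
    split_ifs with hc
    · exact PySem.Set.nodup_add _ _ h
    · exact h

theorem pv_fold_keys1_mem (raw : List (String × List String)) :
    ∀ (fr : PySem.Dict String (PySem.Set String) × PySem.Dict String (PySem.Set String)) (x : String),
    x ∈ (raw.foldl pvAStep fr).1.keys ↔ x ∈ fr.1.keys ∨ ∃ e ∈ raw, x = e.1 ∨ x ∈ e.2 := by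
  induction raw with
  | nil => intro fr x; simp
  | cons e t ih =>
    intro fr x
    rw [List.foldl_cons, ih, pv_step_keys1]
    simp only [List.mem_cons]
    aesop

theorem pv_fold_keys2_mem (raw : List (String × List String)) :
    ∀ (fr : PySem.Dict String (PySem.Set String) × PySem.Dict String (PySem.Set String)) (x : String),
    x ∈ (raw.foldl pvAStep fr).2.keys ↔ x ∈ fr.2.keys ∨ ∃ e ∈ raw, x ∈ e.2 := by
  induction raw with
  | nil => intro fr x; simp
  | cons e t ih =>
    intro fr x
    rw [List.foldl_cons, ih, pv_step_keys2]
    simp only [List.mem_cons]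
    aesop

-- B-side: the symbol accumulation loop
theorem pv_bsym_mem (raw : List (String × List String)) :
    ∀ (s : PySem.Set String) (x : String),
    x ∈ raw.foldl (fun s cr => PySem.Set.update s cr.2) s ↔ x ∈ s ∨ ∃ e ∈ raw, x ∈ e.2 := by
  induction raw with
  | nil => intro s x; simp
  | cons e t ih =>
    intro s x
    rw [List.foldl_cons, ih]
    simp [PySem.Set.mem_update, List.mem_cons]; tauto

theorem pv_bsym_nodup (raw : List (String × List String)) :
    ∀ (s : PySem.Set String), s.Nodup →
    (raw.foldl (fun s cr => PySem.Set.update s cr.2) s).Nodup := by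
  induction raw with
  | nil => intro s h; exact h
  | cons e t ih =>
    intro s h
    rw [List.foldl_cons]
    exact ih _ (PySem.Set.nodup_update _ _ h)

-- B-side: dict lookup on nodup-keyed raw
theorem pv_bget_mem (raw : List (String × List String)) :
    (raw.map Prod.fst).Nodup →
    ∀ (sym x : String),
    x ∈ PySem.Dict.getD (PySem.Dict.mk raw) sym [] ↔ ∃ e ∈ raw, e.1 = sym ∧ x ∈ e.2 := by
  induction raw with
  | nil => intro _ sym x; simp [PySem.Dict.getD, PySem.Dict.get?]
  | cons e t ih =>
    intro hN sym x
    rw [List.map_cons, List.nodup_cons] at hN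
    by_cases h : e.1 = sym
    · have hv : PySem.Dict.getD (PySem.Dict.mk (e :: t)) sym [] = e.2 := by
        simp [PySem.Dict.getD, PySem.Dict.get?, h]
      rw [hv]
      constructor
      · intro hx; exact ⟨e, List.mem_cons_self, h, hx⟩
      · rintro ⟨e', he', hk, hx⟩
        rcases List.mem_cons.1 he' with rfl | he't
        · exact hx
        · exfalso
          apply hN.1
          rw [h, ← hk]
          exact List.mem_map.2 ⟨e', he't, rfl⟩
    · have hv : PySem.Dict.getD (PySem.Dict.mk (e :: t)) sym [] =
          PySem.Dict.getD (PySem.Dict.mk t) sym [] := by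
        simp [PySem.Dict.getD, PySem.Dict.get?, h]
      rw [hv, ih hN.2 sym x]
      constructor
      · rintro ⟨e', he', hk, hx⟩; exact ⟨e', List.mem_cons_of_mem e he', hk, hx⟩
      · rintro ⟨e', he', hk, hx⟩
        rcases List.mem_cons.1 he' with rfl | he't
        · exact absurd hk h
        · exact ⟨e', he't, hk, hx⟩

-- B-side: the caller set comprehension
theorem pv_bcallers_mem (raw : List (String × List String)) (sym x : String) :
    x ∈ PySem.Set.ofList ((raw.filter (fun e => e.2.contains sym)).map Prod.fst) ↔
      ∃ e ∈ raw, e.1 = x ∧ sym ∈ e.2 := by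
  rw [PySem.Set.mem_ofList]
  simp [List.mem_map, List.mem_filter, List.contains_eq_mem]

theorem pv_sorted_isEmpty (xs : List String) :
    (PySem.List.sorted xs (fun x => x) false).isEmpty = xs.isEmpty := by
  by_cases h : xs = []
  · subst h; rfl
  · have h2 : PySem.List.sorted xs (fun x => x) false ≠ [] :=
      fun hh => h ((PySem.List.sorted_eq_nil_iff _ _ _).1 hh)
    obtain ⟨a, as, hxs⟩ := List.exists_cons_of_ne_nil h
    obtain ⟨b, bs, hss⟩ := List.exists_cons_of_ne_nil h2
    rw [hss, hxs]
    rfl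

-- per-symbol records agree
theorem pv_record_eq (raw : List (String × List String))
    (hN : (raw.map Prod.fst).Nodup) (sym : String) :
    pvARecord (pvAMaps raw).1 (pvAMaps raw).2 sym = pvBRecord raw sym := by
  have hFn : (PySem.Dict.getD (pvAMaps raw).1 sym PySem.Set.empty).Nodup := by
    apply pv_fold_fwd_nodup; simp [PySem.Dict.getD_empty, PySem.Set.empty]
  have hRn : (PySem.Dict.getD (pvAMaps raw).2 sym PySem.Set.empty).Nodup := by
    apply pv_fold_rev_nodup; simp [PySem.Dict.getD_empty, PySem.Set.empty]
  have hFp : (PySem.Dict.getD (pvAMaps raw).1 sym PySem.Set.empty).Perm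
      (PySem.Set.ofList (PySem.Dict.getD (PySem.Dict.mk raw) sym [])) := by
    rw [List.perm_ext_iff_of_nodup hFn (PySem.Set.nodup_ofList _)]
    intro x
    unfold pvAMaps
    rw [PySem.Set.mem_ofList, pv_bget_mem raw hN sym x, pv_fold_fwd_mem]
    simp [PySem.Dict.empty, PySem.Dict.getD, PySem.Dict.get?]
  have hRp : (PySem.Dict.getD (pvAMaps raw).2 sym PySem.Set.empty).Perm
      (PySem.Set.ofList ((raw.filter (fun e => e.2.contains sym)).map Prod.fst)) := by
    rw [List.perm_ext_iff_of_nodup hRn (PySem.Set.nodup_ofList _)]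
    intro x
    unfold pvAMaps
    rw [pv_bcallers_mem, pv_fold_rev_mem]
    simp [PySem.Dict.empty, PySem.Dict.getD, PySem.Dict.get?]
  have hFs : PySem.List.sorted (PySem.Dict.getD (pvAMaps raw).1 sym PySem.Set.empty) (fun x => x) false
      = PySem.List.sorted (PySem.Set.ofList (PySem.Dict.getD (PySem.Dict.mk raw) sym [])) (fun x => x) false :=
    (PySem.List.sorted_id_eq_sorted_id_iff_perm _ _).2 hFp
  have hRs : PySem.List.sorted (PySem.Dict.getD (pvAMaps raw).2 sym PySem.Set.empty) (fun x => x) false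
      = PySem.List.sorted (PySem.Set.ofList ((raw.filter (fun e => e.2.contains sym)).map Prod.fst)) (fun x => x) false :=
    (PySem.List.sorted_id_eq_sorted_id_iff_perm _ _).2 hRp
  have hFe : (PySem.Dict.getD (pvAMaps raw).1 sym PySem.Set.empty).isEmpty
      = (PySem.List.sorted (PySem.Set.ofList (PySem.Dict.getD (PySem.Dict.mk raw) sym [])) (fun x => x) false).isEmpty := by
    rw [← hFs, pv_sorted_isEmpty]
  have hRe : (PySem.Dict.getD (pvAMaps raw).2 sym PySem.Set.empty).isEmpty
      = (PySem.List.sorted (PySem.Set.ofList ((raw.filter (fun e => e.2.contains sym)).map Prod.fst)) (fun x => x) false).isEmpty := by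
    rw [← hRs, pv_sorted_isEmpty]
  simp only [pvARecord, pvBRecord]
  rw [hFe, hRe, hFs, hRs]
  split_ifs <;> rfl

-- the sorted symbol lists agree
theorem pv_syms_eq (raw : List (String × List String)) :
    PySem.List.sorted (pvASymbols raw) (fun x => x) false
      = PySem.List.sorted (pvBSymbols raw) (fun x => x) false := by
  apply (PySem.List.sorted_id_eq_sorted_id_iff_perm _ _).2
  have hA : (pvASymbols raw).Nodup :=
    PySem.Set.nodup_union _ _ (PySem.Set.nodup_ofList _)
  have hB : (pvBSymbols raw).Nodup :=
    pv_bsym_nodup raw _ (PySem.Set.nodup_ofList _)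
  rw [List.perm_ext_iff_of_nodup hA hB]
  intro x
  unfold pvASymbols pvBSymbols pvAMaps
  rw [PySem.Set.mem_union, PySem.Set.mem_ofList, PySem.Set.mem_ofList,
    pv_fold_keys1_mem, pv_fold_keys2_mem, pv_bsym_mem, PySem.Set.mem_ofList]
  simp [PySem.Dict.keys, PySem.Dict.empty, List.mem_map]
  aesop

-- ===== VERDICT (by name: the statement is the Claim_ definition above) =====
theorem raw_to_nodes_py_spec : Claim_equal_raw_to_nodes_py := by
  intro raw _hDom hPre
  unfold Spec_raw_to_nodes_py raw_to_nodes_py raw_to_nodes_py_alt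
  have hfun : (fun (nodes : PySem.Dict String (PySem.Dict String (PySem.Dict String (List String)))) sym =>
        PySem.Dict.insert nodes sym (pvARecord (pvAMaps raw).1 (pvAMaps raw).2 sym))
      = (fun nodes sym => PySem.Dict.insert nodes sym (pvBRecord raw sym)) := by
    funext nodes sym
    rw [pv_record_eq raw hPre sym]
  rw [pv_syms_eq, hfun]
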